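-- pv_equiv track=rewrite | github.com/Davidrbr95/TubuleMAP | tubulemap/utils/zarr_resolution.py | default_axes_for_ndim
-- ===== SOURCE A (Python) =====
-- from typing import Any, Dict, Iterable, List, Optional, Sequence, Tuple
--
-- def default_axes_for_ndim(ndim: int) -> List[str]:
--     """Build the default axes for ndim."""
--     if ndim == 5:
--         return ["t", "c", "z", "y", "x"]
--     if ndim == 4:
--         return ["c", "z", "y", "x"]
--     if ndim == 3:
--         return ["z", "y", "x"]
--     if ndim == 2:
--         return ["y", "x"]
--     return [f"dim_{i}" for i in range(ndim)]
-- ===== SOURCE B (Python) =====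
-- def default_axes_for_ndim(ndim: int) -> list:
--     """Build the default axes for ndim."""
--     if not 2 <= ndim <= 5:
--         return [f"dim_{i}" for i in range(ndim)]
--     axes = []
--     for name in ("x", "y", "z", "c", "t"):
--         if len(axes) == ndim:
--             break
--         axes = [name] + axes
--     return axes
-- ===== Notes on version B (the rewrite author's own statement) =====
-- stated objective: alternative
-- what changed: Replaces the four hard-coded branch returns with a single accumulator loop that builds the axis list back-to-front, prepending from ('x','y','z','c','t') until it reaches length ndim; other ndim keep the dim_i comprehension.
import Mathlib
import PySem

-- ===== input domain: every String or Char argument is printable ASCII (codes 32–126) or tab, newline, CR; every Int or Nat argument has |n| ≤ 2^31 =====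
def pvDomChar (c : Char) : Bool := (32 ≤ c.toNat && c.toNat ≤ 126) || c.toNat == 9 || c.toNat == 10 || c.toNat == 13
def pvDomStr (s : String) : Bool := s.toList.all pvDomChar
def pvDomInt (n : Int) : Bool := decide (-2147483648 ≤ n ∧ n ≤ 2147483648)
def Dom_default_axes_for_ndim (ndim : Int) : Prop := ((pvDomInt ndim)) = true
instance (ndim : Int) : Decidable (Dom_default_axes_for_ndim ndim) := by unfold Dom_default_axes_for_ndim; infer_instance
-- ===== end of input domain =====

-- B replaces the four hard-coded branch returns by one accumulator loop that prepends
-- axis names from ("x","y","z","c","t") until the list has length ndim (alternative decomposition).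

-- ===== PORT A =====
def default_axes_for_ndim (ndim : Int) : List String :=
  if ndim == 5 then ["t", "c", "z", "y", "x"]
  else if ndim == 4 then ["c", "z", "y", "x"]
  else if ndim == 3 then ["z", "y", "x"]
  else if ndim == 2 then ["y", "x"]
  else (PySem.List.pyRange 0 ndim 1).map (fun i => "dim_" ++ PySem.Int.toStr i)

-- ===== PORT B =====
-- the accumulator loop of Source B: prepend names until len(axes) == ndim (break)
def pvBuildAxes : List String → Int → List String → List String
  | [], _, axes => axes
  | name :: rest, ndim, axes =>
      if (axes.length : Int) == ndim then axes
      else pvBuildAxes rest ndim (name :: axes)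

def default_axes_for_ndim_alt (ndim : Int) : List String :=
  if ¬ (2 ≤ ndim ∧ ndim ≤ 5) then
    (PySem.List.pyRange 0 ndim 1).map (fun i => "dim_" ++ PySem.Int.toStr i)
  else pvBuildAxes ["x", "y", "z", "c", "t"] ndim []

-- ===== PRECONDITION & SPEC =====
def Spec_default_axes_for_ndim (ndim : Int) (out : List String) : Prop := out = default_axes_for_ndim_alt ndim
instance (ndim : Int) (out : List String) : Decidable (Spec_default_axes_for_ndim ndim out) := by unfold Spec_default_axes_for_ndim; infer_instance

-- ===== CLAIM (what is proved, stated in full; the proofs are below) =====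
def Claim_equal_default_axes_for_ndim : Prop := ∀ (ndim : Int), Dom_default_axes_for_ndim ndim → Spec_default_axes_for_ndim ndim (default_axes_for_ndim ndim)

-- ===== LEMMAS AND PROOFS =====

-- ===== VERDICT (by name: the statement is the Claim_ definition above) =====
theorem default_axes_for_ndim_spec : Claim_equal_default_axes_for_ndim := by
  intro ndim _
  unfold Spec_default_axes_for_ndim default_axes_for_ndim default_axes_for_ndim_alt
  by_cases h5 : ndim = 5
  · subst h5; decide
  · by_cases h4 : ndim = 4
    · subst h4; decide
    · by_cases h3 : ndim = 3
      · subst h3; decide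
      · by_cases h2 : ndim = 2
        · subst h2; decide
        · have hb : ¬ (2 ≤ ndim ∧ ndim ≤ 5) := by omega
          simp [h5, h4, h3, h2, hb]
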